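-- pv_equiv track=rewrite | github.com/takuto-oono/Atcoder | C-ID.py | allocate_id
-- ===== SOURCE A (Python) =====
-- def add_0(_id):
--     _id = '0' * (6 - len(_id)) + _id
--     return _id
--
-- def create_id(prefecture, city):
--     prefecture_id = str(prefecture)
--     prefecture_id = add_0(prefecture_id)
--
--     city_id = str(city)
--     city_id = add_0(city_id)
--
--     id = prefecture_id + city_id
--
--     return id
--
-- def allocate_id(city_list, id_dict):
--     city_list.sort()
--     city = 1
--     prefecture = 1
--
--     for i in range(len(city_list)):
--         p = city_list[i][0]
--         if prefecture != p:
--             prefecture = p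
--             city = 1
--
--         id = create_id(prefecture, city)
--         id_dict[city_list[i][2]] = id
--         city += 1
--
--     return id_dict
-- ===== SOURCE B (Python) =====
-- def allocate_id(city_list, id_dict):
--     # group-based rewrite: sort, then walk prefecture runs and enumerate each run from 1
--     city_list.sort()
--     i, n = 0, len(city_list)
--     while i < n:
--         p = city_list[i][0]
--         j = i
--         while j < n and city_list[j][0] == p:
--             j += 1
--         for idx, row in enumerate(city_list[i:j], 1):
--             s, t = str(p), str(idx)
--             id_dict[row[2]] = '0' * (6 - len(s)) + s + '0' * (6 - len(t)) + t
--         i = j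
--     return id_dict
-- ===== Notes on version B (the rewrite author's own statement) =====
-- stated objective: alternative
-- what changed: Replaces A's single flat pass with prefecture/city counter state carried across iterations by an explicit run-detection loop: find each maximal run of equal prefectures in the sorted list, then enumerate that run from 1 to number its cities.
import Mathlib
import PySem

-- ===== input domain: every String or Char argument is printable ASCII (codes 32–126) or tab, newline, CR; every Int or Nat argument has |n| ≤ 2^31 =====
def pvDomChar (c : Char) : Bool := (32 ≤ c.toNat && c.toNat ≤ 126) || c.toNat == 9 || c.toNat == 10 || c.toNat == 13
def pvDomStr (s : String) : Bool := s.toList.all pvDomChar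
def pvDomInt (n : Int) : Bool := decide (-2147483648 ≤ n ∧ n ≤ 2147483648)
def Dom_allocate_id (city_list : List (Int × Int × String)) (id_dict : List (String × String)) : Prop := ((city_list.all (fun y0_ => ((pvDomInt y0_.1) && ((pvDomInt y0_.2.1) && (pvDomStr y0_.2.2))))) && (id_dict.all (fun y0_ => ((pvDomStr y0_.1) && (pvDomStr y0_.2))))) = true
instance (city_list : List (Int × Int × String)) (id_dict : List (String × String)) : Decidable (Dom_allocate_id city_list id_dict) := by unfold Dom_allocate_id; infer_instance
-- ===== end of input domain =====

-- B re-groups the sorted list into prefecture runs instead of A's flat counter pass; equal return value,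
-- and like A both Pythons mutate city_list (sort) and id_dict in place — the theorem is about the return value.

-- ===== PORT A =====
-- Python sorts the (int, int, str) triples lexicographically: key into the Lex product order
def pvKey3 (x : Int × Int × String) : Lex (Int × Lex (Int × String)) := toLex (x.1, toLex (x.2.1, x.2.2))

-- add_0: '0' * (6 - len(_id)) + _id   (on the code-point list, exact)
def pv_add_0 (cs : List Char) : List Char := PySem.List.pyRepeat ['0'] (6 - (PySem.Chars.len cs : Int)) ++ cs

-- create_id(prefecture, city)
def pv_create_id (prefecture city : Int) : String :=
  String.ofList (pv_add_0 (PySem.Int.toChars prefecture) ++ pv_add_0 (PySem.Int.toChars city))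

-- one iteration of A's for-loop body; state = (prefecture, city, dict)
def pv_stepA (st : Int × Int × PySem.Dict String String) (row : Int × Int × String) :
    Int × Int × PySem.Dict String String :=
  let p := row.1
  let prefecture := if st.1 ≠ p then p else st.1
  let city := if st.1 ≠ p then 1 else st.2.1
  (prefecture, city + 1, st.2.2.insert row.2.2 (pv_create_id prefecture city))

def allocate_id (city_list : List (Int × Int × String)) (id_dict : List (String × String)) : List (String × String) :=
  let slist := PySem.List.sorted city_list pvKey3
  -- for i in range(len(city_list)): … city_list[i] …
  ((PySem.List.pyRange 0 ((slist.length : Int)) 1).foldl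
      (fun st i => pv_stepA st (PySem.List.pyGetD slist i (0, 0, "")))
      (1, 1, PySem.Dict.mk id_dict)).2.2.items

-- ===== PORT B =====
def pv_pad6 (cs : List Char) : List Char := PySem.List.pyRepeat ['0'] (6 - (PySem.Chars.len cs : Int)) ++ cs

def pv_make_id (p idx : Int) : String :=
  String.ofList (pv_pad6 (PySem.Int.toChars p) ++ pv_pad6 (PySem.Int.toChars idx))

-- the outer while-loop of B: cut the sorted list into maximal runs of equal prefecture, with their key
def pv_runs : List (Int × Int × String) → List (Int × List (Int × Int × String))
  | [] => []
  | x :: xs =>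
    (x.1, x :: xs.takeWhile (fun y => y.1 == x.1)) :: pv_runs (xs.dropWhile (fun y => y.1 == x.1))
termination_by l => l.length
decreasing_by
  simpa using Nat.lt_succ_of_le (List.length_dropWhile_le _ _)

-- the inner for-loop of B: for idx, row in enumerate(run, 1): id_dict[row[2]] = …
def pv_assignRun (d : PySem.Dict String String) (p : Int) (g : List (Int × Int × String)) :
    PySem.Dict String String :=
  (PySem.List.enumerate g 1).foldl (fun d ir => d.insert ir.2.2.2 (pv_make_id p ir.1)) d

def allocate_id_alt (city_list : List (Int × Int × String)) (id_dict : List (String × String)) : List (String × String) :=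
  let slist := PySem.List.sorted city_list pvKey3
  ((pv_runs slist).foldl (fun d pg => pv_assignRun d pg.1 pg.2) (PySem.Dict.mk id_dict)).items

-- ===== PRECONDITION & SPEC =====
def Spec_allocate_id (city_list : List (Int × Int × String)) (id_dict : List (String × String)) (out : List (String × String)) : Prop := out = allocate_id_alt city_list id_dict
instance (city_list : List (Int × Int × String)) (id_dict : List (String × String)) (out : List (String × String)) : Decidable (Spec_allocate_id city_list id_dict out) := by unfold Spec_allocate_id; infer_instance

-- ===== CLAIM (what is proved, stated in full; the proofs are below) =====
def Claim_equal_allocate_id : Prop := ∀ (city_list : List (Int × Int × String)) (id_dict : List (String × String)), Dom_allocate_id city_list id_dict → Spec_allocate_id city_list id_dict (allocate_id city_list id_dict)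

-- ===== LEMMAS AND PROOFS =====

-- generalized inner-loop version of pv_assignRun, enumerating from c
def pv_assignFrom (d : PySem.Dict String String) (p c : Int) (g : List (Int × Int × String)) :
    PySem.Dict String String :=
  (PySem.List.enumerate g c).foldl (fun d ir => d.insert ir.2.2.2 (pv_make_id p ir.1)) d

-- A's fold across a run whose rows all carry prefecture p
lemma foldA_run (g : List (Int × Int × String)) (p : Int) :
    ∀ (c : Int) (d : PySem.Dict String String), (∀ x ∈ g, x.1 = p) →
    g.foldl pv_stepA (p, c, d) = (p, c + g.length, pv_assignFrom d p c g) := by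
  induction g with
  | nil => intro c d _; simp [pv_assignFrom, PySem.List.enumerate_nil]
  | cons y t ih =>
    intro c d hall
    have hy : y.1 = p := hall y (by simp)
    have ht : ∀ x ∈ t, x.1 = p := fun x hx => hall x (by simp [hx])
    have hstep : pv_stepA (p, c, d) y = (p, c + 1, d.insert y.2.2 (pv_create_id p c)) := by
      simp [pv_stepA, hy]
    rw [List.foldl_cons, hstep, ih (c + 1) _ ht]
    simp only [Prod.mk.injEq, List.length_cons]
    refine ⟨by trivial, by push_cast; ring, ?_⟩
    simp [pv_assignFrom, PySem.List.enumerate_cons, pv_make_id, pv_create_id, pv_pad6, pv_add_0]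

-- A's whole pass equals B's run-by-run pass, provided the city counter is freshly reset
-- (c = 1) or the head starts a new prefecture (head.1 ≠ st-prefecture).
lemma foldA_eq_runs (l : List (Int × Int × String)) :
    ∀ (p c : Int) (d : PySem.Dict String String),
    (∀ y ∈ l.head?, y.1 ≠ p ∨ c = 1) →
    (l.foldl pv_stepA (p, c, d)).2.2 = (pv_runs l).foldl (fun d pg => pv_assignRun d pg.1 pg.2) d := by
  induction l using pv_runs.induct with
  | case1 => intro p c d _; simp [pv_runs]
  | case2 x xs ih =>
    intro p c d hh
    have hstep : pv_stepA (p, c, d) x = (x.1, 2, d.insert x.2.2 (pv_create_id x.1 1)) := by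
      rcases hh x (by simp) with h | h
      · have hpx : ¬ p = x.1 := fun e => h e.symm
        simp [pv_stepA, hpx]
      · subst h
        by_cases hpx : p = x.1
        · simp [pv_stepA, hpx]
        · simp [pv_stepA, hpx]
    have hsplit : xs = xs.takeWhile (fun y => y.1 == x.1) ++ xs.dropWhile (fun y => y.1 == x.1) :=
      (List.takeWhile_append_dropWhile).symm
    have htake : ∀ y ∈ xs.takeWhile (fun y => y.1 == x.1), y.1 = x.1 := by
      intro y hy
      simpa using List.mem_takeWhile_imp hy
    have hdrop : ∀ y ∈ (xs.dropWhile (fun y => y.1 == x.1)).head?, y.1 ≠ x.1 ∨ (2 + ((xs.takeWhile (fun y => y.1 == x.1)).length : Int)) = 1 := by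
      intro y hy
      left
      have := List.head?_dropWhile_not (fun y => y.1 == x.1) xs
      rw [Option.mem_def] at hy
      simp [hy] at this
      simpa using this
    rw [List.foldl_cons, hstep]
    conv_lhs => rw [hsplit]
    rw [List.foldl_append,
        foldA_run (xs.takeWhile (fun y => y.1 == x.1)) x.1 2 _ htake,
        ih _ _ _ hdrop]
    rw [pv_runs]
    -- B's run assignment = insert the head, then fold the tail of the run enumerated from 2
    simp only [List.foldl_cons]
    congr 1

-- both ports, after the shared sort, reduced to the two folds over the same list
lemma ports_eq_on (l : List (Int × Int × String)) (idd : List (String × String)) :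
    ((PySem.List.pyRange 0 ((l.length : Int)) 1).foldl
        (fun st i => pv_stepA st (PySem.List.pyGetD l i (0, 0, ""))) (1, 1, PySem.Dict.mk idd)).2.2.items
      = ((pv_runs l).foldl (fun d pg => pv_assignRun d pg.1 pg.2) (PySem.Dict.mk idd)).items := by
  rw [PySem.List.foldl_pyRange_zero_pyGetD' l ((0 : Int), (0 : Int), "") pv_stepA (1, 1, PySem.Dict.mk idd)]
  rw [foldA_eq_runs l 1 1 _ (by intro y _; right; rfl)]

-- ===== VERDICT (by name: the statement is the Claim_ definition above) =====
theorem allocate_id_spec : Claim_equal_allocate_id := by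
  intro city_list id_dict _
  show allocate_id city_list id_dict = allocate_id_alt city_list id_dict
  exact ports_eq_on (PySem.List.sorted city_list pvKey3) id_dict
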